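-- pv_equiv track=rewrite | github.com/WaduHekTJ/Public_Accountant2Excel | Transition/湖南/湖南2019.py | getShiwusuo
-- ===== SOURCE A (Python) =====
-- def getShiwusuo(paragraph:list,index:list):
--     shiwusuo = []
--     shiwusuo = []
--     i = 0
--     while i < len(index):
--         if i == len(index)-1:
--             shiwusuo.append(paragraph[index[i]:len(paragraph)])
--         else:
--             shiwusuo.append(paragraph[index[i]:index[i+1]])
--         i = i + 1
--
--     return shiwusuo
-- ===== SOURCE B (Python) =====
-- def getShiwusuo(paragraph: list, index: list):
--     # single backward pass: walk the boundaries from the last to the first,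
--     # carrying the upper boundary of the current slice; build the result
--     # back-to-front and reverse it once at the end.
--     res = []
--     nxt = len(paragraph)
--     for a in reversed(index):
--         res.append(paragraph[a:nxt])
--         nxt = a
--     res.reverse()
--     return res
-- ===== Notes on version B (the rewrite author's own statement) =====
-- stated objective: alternative
-- what changed: Replaces the forward indexed loop with its last-element conditional by a single backward pass over the boundaries that carries the next slice's upper bound in an accumulator, builds the result back-to-front and reverses it once; no index arithmetic, no i+1 lookup, no special case.
import Mathlib
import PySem

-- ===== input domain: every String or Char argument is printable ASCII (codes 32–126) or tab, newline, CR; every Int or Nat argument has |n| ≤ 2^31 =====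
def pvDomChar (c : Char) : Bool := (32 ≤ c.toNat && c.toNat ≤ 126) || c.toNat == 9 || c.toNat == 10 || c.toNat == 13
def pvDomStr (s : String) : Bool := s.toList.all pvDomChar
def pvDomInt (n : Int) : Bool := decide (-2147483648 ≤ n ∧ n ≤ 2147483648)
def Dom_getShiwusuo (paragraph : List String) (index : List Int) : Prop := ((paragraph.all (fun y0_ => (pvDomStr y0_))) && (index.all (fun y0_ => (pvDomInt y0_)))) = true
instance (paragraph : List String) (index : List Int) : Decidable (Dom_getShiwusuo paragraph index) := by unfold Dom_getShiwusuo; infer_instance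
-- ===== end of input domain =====

-- B replaces A's forward indexed loop (with its last-element branch) by one backward
-- pass carrying the next slice's upper bound, building the result back-to-front;
-- objective: alternative decomposition, same cost.

-- ===== PORT A =====
-- the while loop, step for step: fuel counts the remaining iterations (len(index) - i);
-- index[i] with 0 ≤ i < len(index) is in range, so getD is exact here
def getShiwusuoLoop (paragraph : List String) (index : List Int) : Nat → Nat → List (List String) → List (List String)
  | 0, _, acc => acc
  | fuel + 1, i, acc =>
    if i < index.length then
      if i = index.length - 1 then
        getShiwusuoLoop paragraph index fuel (i + 1)
          (acc ++ [PySem.List.slice paragraph (some (index.getD i 0)) (some (paragraph.length : Int))])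
      else
        getShiwusuoLoop paragraph index fuel (i + 1)
          (acc ++ [PySem.List.slice paragraph (some (index.getD i 0)) (some (index.getD (i + 1) 0))])
    else acc

def getShiwusuo (paragraph : List String) (index : List Int) : List (List String) :=
  getShiwusuoLoop paragraph index index.length 0 []

-- ===== PORT B =====
-- the 'for a in reversed(index)' loop: a fold over index.reverse whose state is
-- (nxt, res); then res.reverse()
def getShiwusuo_alt (paragraph : List String) (index : List Int) : List (List String) :=
  let st := index.reverse.foldl
    (fun (st : Int × List (List String)) a =>
      (a, st.2 ++ [PySem.List.slice paragraph (some a) (some st.1)]))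
    ((paragraph.length : Int), [])
  st.2.reverse

-- ===== PRECONDITION & SPEC =====
def Spec_getShiwusuo (paragraph : List String) (index : List Int) (out : List (List String)) : Prop := out = getShiwusuo_alt paragraph index
instance (paragraph : List String) (index : List Int) (out : List (List String)) : Decidable (Spec_getShiwusuo paragraph index out) := by unfold Spec_getShiwusuo; infer_instance

-- ===== CLAIM (what is proved, stated in full; the proofs are below) =====
def Claim_equal_getShiwusuo : Prop := ∀ (paragraph : List String) (index : List Int), Dom_getShiwusuo paragraph index → Spec_getShiwusuo paragraph index (getShiwusuo paragraph index)

-- ===== LEMMAS AND PROOFS =====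

-- the common normal form: slices of consecutive pairs of the sentinel boundary list
def pvPairs (l : List Int) : List (Int × Int) := l.zip l.tail

-- loop invariant for A: with fuel = len(index) - i, the loop appends to acc exactly the
-- slices of consecutive boundary pairs from position i on
theorem getShiwusuoLoop_eq (paragraph : List String) (index : List Int) :
    ∀ (n i : Nat) (acc : List (List String)), n + i = index.length →
      getShiwusuoLoop paragraph index n i acc =
        acc ++ (((index ++ [(paragraph.length : Int)]).drop i).zip
                ((index ++ [(paragraph.length : Int)]).drop (i + 1))).map
          (fun ab => PySem.List.slice paragraph (some ab.1) (some ab.2)) := by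
  intro n
  induction n with
  | zero =>
    intro i acc h
    simp at h
    subst h
    simp [getShiwusuoLoop]
  | succ n ih =>
    intro i acc h
    have hi : i < index.length := by omega
    have hib : i < (index ++ [(paragraph.length : Int)]).length := by
      simp; omega
    have hib1 : i + 1 < (index ++ [(paragraph.length : Int)]).length := by
      simp; omega
    have hdrop : (index ++ [(paragraph.length : Int)]).drop i
        = (index ++ [(paragraph.length : Int)])[i] :: (index ++ [(paragraph.length : Int)]).drop (i + 1) :=
      List.drop_eq_getElem_cons hib
    have hdrop1 : (index ++ [(paragraph.length : Int)]).drop (i + 1)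
        = (index ++ [(paragraph.length : Int)])[i + 1] :: (index ++ [(paragraph.length : Int)]).drop (i + 2) :=
      List.drop_eq_getElem_cons hib1
    have hgi : (index ++ [(paragraph.length : Int)])[i]'hib = index[i]'hi :=
      List.getElem_append_left hi
    rw [getShiwusuoLoop]
    by_cases hlast : i = index.length - 1
    · -- last iteration: the sentinel at position i+1 is len(paragraph)
      have hn : n = 0 := by omega
      have hi1 : i + 1 = index.length := by omega
      have hgi1 : (index ++ [(paragraph.length : Int)])[i + 1]'hib1 = (paragraph.length : Int) := by
        rw [List.getElem_append_right (by omega)]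
        simp [hi1]
      rw [if_pos hi, if_pos hlast, hn, getShiwusuoLoop, hdrop, hdrop1, hgi, hgi1]
      have hnil : (index ++ [(paragraph.length : Int)]).drop (i + 2) = [] := by
        apply List.drop_eq_nil_of_le; simp; omega
      simp [hnil, List.getElem?_eq_getElem hi]
    · have hi1 : i + 1 < index.length := by omega
      have hgi1 : (index ++ [(paragraph.length : Int)])[i + 1]'hib1 = index[i + 1]'hi1 :=
        List.getElem_append_left hi1
      rw [if_pos hi, if_neg hlast, ih (i + 1) _ (by omega), hdrop, hdrop1, hgi, hgi1]
      simp [List.getElem?_eq_getElem hi, List.getElem?_eq_getElem hi1]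

-- what B's backward pass computes, as structural recursion on the reversed boundary list
def pvSliceH (paragraph : List String) : List Int → Int → List (List String)
  | [], _ => []
  | a :: rs, nxt => pvSliceH paragraph rs a ++ [PySem.List.slice paragraph (some a) (some nxt)]

-- B's fold accumulates exactly pvSliceH, reversed, onto acc
theorem foldl_eq_pvSliceH (paragraph : List String) :
    ∀ (rs : List Int) (nxt : Int) (acc : List (List String)),
      (rs.foldl (fun (st : Int × List (List String)) a =>
          (a, st.2 ++ [PySem.List.slice paragraph (some a) (some st.1)])) (nxt, acc)).2
        = acc ++ (pvSliceH paragraph rs nxt).reverse := by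
  intro rs
  induction rs with
  | nil => intro nxt acc; simp [pvSliceH]
  | cons a rs ih =>
    intro nxt acc
    simp only [List.foldl_cons, pvSliceH, ih]
    simp

-- appending one more boundary appends one more consecutive pair
theorem pvPairs_append_two (a b : Int) :
    ∀ (m : List Int), pvPairs (m ++ [a, b]) = pvPairs (m ++ [a]) ++ [(a, b)] := by
  intro m
  induction m with
  | nil => simp [pvPairs]
  | cons x m ih =>
    cases m with
    | nil => simp [pvPairs]
    | cons y m' =>
      simp only [pvPairs, List.cons_append, List.tail_cons, List.zip_cons_cons] at *
      rw [ih]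

-- the backward pass produces the consecutive-pair slices of the reversed boundaries
theorem pvSliceH_eq (paragraph : List String) :
    ∀ (l : List Int) (nxt : Int),
      pvSliceH paragraph l nxt
        = (pvPairs (l.reverse ++ [nxt])).map
            (fun ab => PySem.List.slice paragraph (some ab.1) (some ab.2)) := by
  intro l
  induction l with
  | nil => intro nxt; simp [pvSliceH, pvPairs]
  | cons a rs ih =>
    intro nxt
    have h2 : rs.reverse ++ [a] ++ [nxt] = rs.reverse ++ [a, nxt] := by simp
    simp only [pvSliceH, ih, List.reverse_cons, h2, pvPairs_append_two]
    simp

-- ===== VERDICT (by name: the statement is the Claim_ definition above) =====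
theorem getShiwusuo_spec : Claim_equal_getShiwusuo := by
  intro paragraph index _
  unfold Spec_getShiwusuo getShiwusuo getShiwusuo_alt
  rw [getShiwusuoLoop_eq paragraph index index.length 0 [] (by omega)]
  simp only [foldl_eq_pvSliceH, pvSliceH_eq, List.nil_append, List.reverse_reverse,
    List.map_reverse, List.drop_zero]
  simp [pvPairs, List.drop_one]
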